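-- pv_equiv track=rewrite | github.com/masterdcups/M2DC-Argumentation | ml/mllib/preprocessing/text_preprocessing/text_preprocessing.py | sentences_tokens2sentences_spans
-- ===== SOURCE A (Python) =====
-- def sentences_tokens2sentences_spans(sentences_tokens: [[str]]) -> [(int, int)]:
--     sentences_spans = []
--
--     current_token_index = 0
--     for sentence in sentences_tokens:
--         sentence_len = len(sentence)
--         sentences_spans.append(
--             (current_token_index, current_token_index+sentence_len-1))
--         current_token_index += sentence_len
--
--     return sentences_spans
-- ===== SOURCE B (Python) =====
-- def sentences_tokens2sentences_spans(sentences_tokens):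
--     lengths = [len(s) for s in sentences_tokens]
--     starts = [sum(lengths[:i]) for i in range(len(lengths))]
--     return [(start, start + length - 1) for start, length in zip(starts, lengths)]
-- ===== Notes on version B (the rewrite author's own statement) =====
-- stated objective: alternative
-- what changed: Replaces the single running-index loop with a build-table-then-map decomposition: a lengths list, a prefix-sum start table, and a zip emitting (start, start+len-1); no mutable running state.
import Mathlib
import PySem

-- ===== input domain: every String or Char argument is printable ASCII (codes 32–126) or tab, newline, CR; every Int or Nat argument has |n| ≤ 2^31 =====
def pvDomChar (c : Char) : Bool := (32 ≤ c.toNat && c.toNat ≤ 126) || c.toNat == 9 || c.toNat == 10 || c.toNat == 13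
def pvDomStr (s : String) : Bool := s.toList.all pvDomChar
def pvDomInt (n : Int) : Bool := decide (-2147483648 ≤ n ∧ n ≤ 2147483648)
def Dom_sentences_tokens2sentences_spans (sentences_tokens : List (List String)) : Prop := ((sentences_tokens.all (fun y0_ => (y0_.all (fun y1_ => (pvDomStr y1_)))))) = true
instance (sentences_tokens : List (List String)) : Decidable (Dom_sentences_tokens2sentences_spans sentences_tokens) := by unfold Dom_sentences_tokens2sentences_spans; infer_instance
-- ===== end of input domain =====

-- B replaces the running-index loop with a prefix-sum start table zipped with lengths (different decomposition; no speed claim).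


-- ===== PORT A =====
def sentences_tokens2sentences_spans (sentences_tokens : List (List String)) : List (Int × Int) :=
  (sentences_tokens.foldl
    (fun (st : List (Int × Int) × Int) sentence =>
      let sentence_len : Int := (sentence.length : Int)
      (st.1 ++ [(st.2, st.2 + sentence_len - 1)], st.2 + sentence_len))
    ([], 0)).1

-- ===== PORT B =====
def sentences_tokens2sentences_spans_alt (sentences_tokens : List (List String)) : List (Int × Int) :=
  let lengths : List Int := sentences_tokens.map (fun s => (s.length : Int))
  let starts : List Int := (List.range lengths.length).map (fun i => (lengths.take i).sum)
  List.zipWith (fun start length => (start, start + length - 1)) starts lengths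

-- ===== PRECONDITION & SPEC =====
def Spec_sentences_tokens2sentences_spans (sentences_tokens : List (List String)) (out : List (Int × Int)) : Prop := out = sentences_tokens2sentences_spans_alt sentences_tokens
instance (sentences_tokens : List (List String)) (out : List (Int × Int)) : Decidable (Spec_sentences_tokens2sentences_spans sentences_tokens out) := by unfold Spec_sentences_tokens2sentences_spans; infer_instance

-- ===== CLAIM (what is proved, stated in full; the proofs are below) =====
def Claim_equal_sentences_tokens2sentences_spans : Prop := ∀ (sentences_tokens : List (List String)), Dom_sentences_tokens2sentences_spans sentences_tokens → Spec_sentences_tokens2sentences_spans sentences_tokens (sentences_tokens2sentences_spans sentences_tokens)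

-- ===== LEMMAS AND PROOFS =====

theorem spans_foldl_eq (ls : List Int) (acc : List (Int × Int)) (c : Int) :
    (ls.foldl
      (fun (st : List (Int × Int) × Int) l => (st.1 ++ [(st.2, st.2 + l - 1)], st.2 + l))
      (acc, c)).1
    = acc ++ List.zipWith (fun start length => (start, start + length - 1))
        ((List.range ls.length).map (fun i => c + (ls.take i).sum)) ls := by
  induction ls generalizing acc c with
  | nil => simp
  | cons l tl ih =>
    simp only [List.foldl_cons, List.length_cons, List.range_succ_eq_map,
      List.map_cons, List.map_map, List.zipWith_cons_cons, List.take_zero,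
      List.sum_nil, add_zero]
    rw [ih]
    simp only [List.append_assoc, List.singleton_append]
    congr 2
    congr 1
    apply List.map_congr_left
    intro i _
    simp [List.take_succ_cons, Function.comp]
    ring

-- ===== VERDICT (by name: the statement is the Claim_ definition above) =====
theorem sentences_tokens2sentences_spans_spec : Claim_equal_sentences_tokens2sentences_spans := by
  intro xs _
  show sentences_tokens2sentences_spans xs = sentences_tokens2sentences_spans_alt xs
  unfold sentences_tokens2sentences_spans sentences_tokens2sentences_spans_alt
  have h := spans_foldl_eq (xs.map (fun s => (s.length : Int))) [] 0
  simp only [zero_add, List.nil_append] at h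
  rw [← h]
  simp [List.foldl_map]
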